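-- pv_equiv track=rewrite | github.com/Nukesor/sticker-finder | stickerfinder/logic/tag.py | get_tags_from_text
-- ===== SOURCE A (Python) =====
-- from collections import OrderedDict
--
-- ignored_characters = set(["\n", ",", ".", "!", "?", "'", "@", "#", "*", "[", "_"])
--
-- def get_tags_from_text(text, limit=15):
--     """Extract and clean tags from incoming string."""
--     original_text = text
--     text = text.lower().strip()
--
--     # Remove the /tag command
--     if text.startswith("/tag"):
--         text = text[4:]
--
--     # Remove #request tag
--     if text.startswith("#request"):
--         text = text[8:]
--
--     # Split and strip
--     tags = [tag.strip() for tag in text.split(" ") if tag.strip() != ""]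
--
--     # Remove words or links that are undesired
--     partial_word_blacklist = [
--         "telegramme",
--         "telegram.me",
--         "tme/",
--         "t.me",
--         "https://",
--         "http://",
--         "addstickers",
--         "randomset",
--     ]
--
--     def contains_partial_word(tag):
--         for word in partial_word_blacklist:
--             if word in tag:
--                 return True
--         return False
--
--     tags = [tag for tag in tags if not contains_partial_word(tag)]
--
--     # Clean the text
--     def remove_ignored_chars(tag):
--         for ignored in ignored_characters:
--             tag = tag.replace(ignored, "")
--         return tag
--
--     tags = [remove_ignored_chars(tag) for tag in tags]
--
--     # Remove tags accidentally added while using an inline bots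
--     if len(tags) > 0 and original_text.startswith("@") and "bot" in tags[0]:
--         tags.pop(0)
--
--     # Deduplicate tags
--     tags = list(OrderedDict.fromkeys(tags))
--
--     filtered_tags = []
--     # Remove characters that occur more than three times consecutively
--     for tag in tags:
--         count = 0
--         prev_char = None
--         new_tag = ""
--         for char in tag:
--             if prev_char == char:
--                 count += 1
--                 if count < 3:
--                     new_tag += char
--             else:
--                 prev_char = char
--                 count = 0
--                 new_tag += char
--
--         filtered_tags.append(new_tag)
--
--     return filtered_tags[:15]
-- ===== SOURCE B (Python) =====
-- # B: one-pass word cleaning + run-length collapse with early-stopping dedup (instead of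
-- # A's five separate list passes and per-character counter loop). Same results.
--
-- IGNORED_CHARS = "\n,.!?'@#*[_"
--
-- BLACKLIST = (
--     "telegramme",
--     "telegram.me",
--     "tme/",
--     "t.me",
--     "https://",
--     "http://",
--     "addstickers",
--     "randomset",
-- )
--
--
-- def _collapse(word):
--     """Keep at most 3 consecutive identical characters, via run-length scanning."""
--     out = []
--     i = 0
--     n = len(word)
--     while i < n:
--         j = i
--         while j < n and word[j] == word[i]:
--             j += 1
--         out.append(word[i] * min(j - i, 3))
--         i = j
--     return "".join(out)
--
--
-- def get_tags_from_text(text, limit=15):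
--     body = text.lower().strip()
--     for prefix in ("/tag", "#request"):
--         if body.startswith(prefix):
--             body = body[len(prefix):]
--
--     words = []
--     for word in body.split(" "):
--         word = word.strip()
--         if word != "" and not any(bad in word for bad in BLACKLIST):
--             words.append("".join(c for c in word if c not in IGNORED_CHARS))
--
--     if words and text.startswith("@") and "bot" in words[0]:
--         words = words[1:]
--
--     result = []
--     seen = set()
--     for word in words:
--         if len(result) == 15:
--             break
--         if word not in seen:
--             seen.add(word)
--             result.append(_collapse(word))
--     return result
-- ===== Notes on version B (the rewrite author's own statement) =====
-- stated objective: alternative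
-- what changed: B merges A's split/strip/blacklist/clean list passes into one accumulating pass, replaces A's per-character counter loop by a run-length collapse (scan each run once, emit at most 3 chars), and fuses dedup with the [:15] cut by stopping the dedup loop at 15 tags.
import Mathlib
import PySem

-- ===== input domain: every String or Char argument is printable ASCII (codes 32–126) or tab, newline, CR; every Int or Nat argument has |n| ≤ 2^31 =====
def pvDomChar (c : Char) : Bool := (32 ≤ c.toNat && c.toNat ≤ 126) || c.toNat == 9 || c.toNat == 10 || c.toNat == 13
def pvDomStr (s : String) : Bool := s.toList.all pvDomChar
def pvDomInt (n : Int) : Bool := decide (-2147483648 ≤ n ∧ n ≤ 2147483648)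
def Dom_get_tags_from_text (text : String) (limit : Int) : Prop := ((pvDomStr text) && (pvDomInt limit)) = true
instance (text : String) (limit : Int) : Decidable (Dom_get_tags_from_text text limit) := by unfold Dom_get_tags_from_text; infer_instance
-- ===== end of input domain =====

-- B replaces A's five separate list passes by one cleaning pass over the split words, a run-length
-- collapse instead of A's per-character counter loop, and a dedup loop that stops at 15 tags;
-- return values are identical (objective: alternative).

-- ===== PORT A =====
-- ignored_characters is a Python set of single-character strings; each replace deletes all
-- occurrences of one distinct character, so the replaces commute and this fixed iteration
-- order is exact regardless of Python's set hash order.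
def pvIgnoredA : List Char := ['\n', ',', '.', '!', '?', '\'', '@', '#', '*', '[', '_']

def pvBlacklistA : List String :=
  ["telegramme", "telegram.me", "tme/", "t.me", "https://", "http://", "addstickers", "randomset"]

-- 'for word in blacklist: if word in tag: return True / return False' — the early-return loop is List.any
def pvContainsPartialWord (tag : String) : Bool :=
  pvBlacklistA.any (fun w => PySem.Str.isIn w tag)

def pvRemoveIgnoredChars (tag : String) : String :=
  pvIgnoredA.foldl (fun t ig => PySem.Str.replace t (String.ofList [ig]) "") tag

-- the inner character loop of A: state = (count, prev_char, new_tag); new_tag built as a char list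
def pvStepA (st : Nat × Option Char × List Char) (c : Char) : Nat × Option Char × List Char :=
  if st.2.1 == some c then
    let count := st.1 + 1
    (count, st.2.1, if count < 3 then st.2.2 ++ [c] else st.2.2)
  else
    (0, some c, st.2.2 ++ [c])

def pvCollapseA (tag : String) : String :=
  String.ofList ((tag.toList.foldl pvStepA (0, none, [])).2.2)

def get_tags_from_text (text : String) (limit : Int) : List String :=
  let original_text := text
  let text1 := PySem.Str.strip (PySem.Str.lower text)
  let text2 := if PySem.Str.startswith text1 "/tag" then PySem.Str.slice text1 (some 4) none else text1
  let text3 := if PySem.Str.startswith text2 "#request" then PySem.Str.slice text2 (some 8) none else text2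
  -- text.split(" "): the separator is nonempty, so split? is always some
  let tags0 := (((PySem.Str.split? text3 " ").getD []).map PySem.Str.strip).filter (fun t => t != "")
  let tags1 := tags0.filter (fun t => !pvContainsPartialWord t)
  let tags2 := tags1.map pvRemoveIgnoredChars
  -- tags[0] is guarded by len(tags) > 0, so headD "" is exact; pop(0) leaves the tail
  let tags3 := if decide (tags2.length > 0) && PySem.Str.startswith original_text "@"
      && PySem.Str.isIn "bot" (tags2.headD "") then tags2.drop 1 else tags2
  let tags4 := PySem.List.dedup tags3
  let filtered := tags4.foldl (fun acc t => acc ++ [pvCollapseA t]) []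
  PySem.List.slice filtered none (some 15)

-- ===== PORT B =====
def pvIgnoredCharsB : List Char := ['\n', ',', '.', '!', '?', '\'', '@', '#', '*', '[', '_']

def pvBlacklistB : List String :=
  ["telegramme", "telegram.me", "tme/", "t.me", "https://", "http://", "addstickers", "randomset"]

def pvCleanWordB (w : String) : String :=
  String.ofList (w.toList.filter (fun c => !pvIgnoredCharsB.contains c))

-- run-length collapse, hand-ported: the inner index loop finding the run end j is
-- takeWhile on the remaining chars, and advancing i to j is dropWhile (exact, step for step)
def pvCollapseB : List Char → List Char
  | [] => []
  | c :: rest =>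
    List.replicate (min ((rest.takeWhile (· == c)).length + 1) 3) c
      ++ pvCollapseB (rest.dropWhile (· == c))
  termination_by l => l.length
  decreasing_by simp only [List.length_cons]; exact Nat.lt_succ_of_le (List.length_dropWhile_le _ rest)

-- dedup loop with early stop at 15 tags
def pvLoopB : List String → PySem.Set String → List String → List String
  | [], _, result => result
  | w :: rest, seen, result =>
    if result.length == 15 then result
    else if PySem.Set.contains seen w then pvLoopB rest seen result
    else pvLoopB rest (PySem.Set.add seen w) (result ++ [String.ofList (pvCollapseB w.toList)])

def get_tags_from_text_alt (text : String) (limit : Int) : List String :=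
  let body0 := PySem.Str.strip (PySem.Str.lower text)
  let body := ["/tag", "#request"].foldl
    (fun b p => if PySem.Str.startswith b p then PySem.Str.slice b (some (PySem.Str.len p)) none else b) body0
  let words0 := ((PySem.Str.split? body " ").getD []).foldl
    (fun acc w =>
      if PySem.Str.strip w != ""
          && !(pvBlacklistB.any (fun bad => PySem.Str.isIn bad (PySem.Str.strip w))) then
        acc ++ [pvCleanWordB (PySem.Str.strip w)]
      else acc) []
  -- words[1:] is drop 1; words[0] is guarded by truthiness of words, so headD "" is exact
  let words := if !(words0 == []) && PySem.Str.startswith text "@"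
      && PySem.Str.isIn "bot" (words0.headD "") then words0.drop 1 else words0
  pvLoopB words PySem.Set.empty []

-- ===== PRECONDITION & SPEC =====
def Spec_get_tags_from_text (text : String) (limit : Int) (out : List String) : Prop := out = get_tags_from_text_alt text limit
instance (text : String) (limit : Int) (out : List String) : Decidable (Spec_get_tags_from_text text limit out) := by unfold Spec_get_tags_from_text; infer_instance

-- ===== CLAIM (what is proved, stated in full; the proofs are below) =====
def Claim_equal_get_tags_from_text : Prop := ∀ (text : String) (limit : Int), Dom_get_tags_from_text text limit → Spec_get_tags_from_text text limit (get_tags_from_text text limit)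

-- ===== LEMMAS AND PROOFS =====

-- each single-character replace is a filter over the characters
lemma pv_replace_go_single (x : Char) : ∀ (fuel : Nat) (l acc : List Char), l.length ≤ fuel →
    PySem.Chars.replace.go [x] [] fuel l acc = acc.reverse ++ l.filter (fun c => !(c == x)) := by
  intro fuel
  induction fuel with
  | zero =>
    intro l acc h
    have : l = [] := List.eq_nil_of_length_eq_zero (Nat.le_zero.mp h)
    subst this
    simp [PySem.Chars.replace.go]
  | succ n ih =>
    intro l acc h
    cases l with
    | nil => simp [PySem.Chars.replace.go]
    | cons c t =>
      rw [PySem.Chars.replace.go]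
      by_cases hc : c = x
      · subst hc
        simp only [List.isPrefixOf, beq_self_eq_true, Bool.and_self, if_true,
          List.length_cons, List.length_nil, List.drop_succ_cons, List.drop_zero,
          List.reverse_nil, List.nil_append]
        rw [ih t acc (Nat.le_of_succ_le_succ (by simpa using h))]
        simp
      · rw [if_neg (by simp [List.isPrefixOf]; exact fun hcx => hc hcx.symm)]
        rw [ih t (c :: acc) (Nat.le_of_succ_le_succ (by simpa using h))]
        simp [hc]

lemma pv_replace_single (cs : List Char) (x : Char) :
    PySem.Chars.replace cs [x] [] = cs.filter (fun c => !(c == x)) := by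
  rw [PySem.Chars.replace]
  simp only [List.isEmpty_cons, if_false, Bool.false_eq_true]
  rw [pv_replace_go_single x cs.length cs [] (le_refl _)]
  simp

lemma pv_foldl_filter_not (igs : List Char) : ∀ (cs : List Char),
    igs.foldl (fun s i => s.filter (fun c => !(c == i))) cs
      = cs.filter (fun c => !(igs.contains c)) := by
  induction igs with
  | nil => intro cs; simp
  | cons i igs ih =>
    intro cs
    simp only [List.foldl_cons, ih, List.filter_filter]
    refine List.filter_congr ?_
    intro c _
    by_cases h : c = i <;> simp [h, Bool.and_comm]

lemma pv_remove_eq_clean (t : String) : pvRemoveIgnoredChars t = pvCleanWordB t := by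
  apply String.toList_inj.mp
  have hrep : ∀ (s : String) (x : Char),
      (PySem.Str.replace s (String.ofList [x]) "").toList = s.toList.filter (fun c => !(c == x)) := by
    intro s x
    rw [PySem.Str.toList_replace, String.toList_ofList,
      (show ("" : String).toList = [] from by decide), pv_replace_single]
  have hfold : ∀ (igs : List Char) (s : String),
      (igs.foldl (fun t i => PySem.Str.replace t (String.ofList [i]) "") s).toList
        = igs.foldl (fun cs i => cs.filter (fun c => !(c == i))) s.toList := by
    intro igs
    induction igs with
    | nil => intro s; rfl
    | cons i igs ih =>
      intro s
      simp only [List.foldl_cons, ih, hrep]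
  rw [pvRemoveIgnoredChars, pvCleanWordB, hfold, pv_foldl_filter_not, String.toList_ofList]
  rfl

-- the word-cleaning passes agree
lemma pv_words_eq (l : List String) :
    ((((l.map PySem.Str.strip).filter (fun t => t != "")).filter
        (fun t => !pvContainsPartialWord t)).map pvRemoveIgnoredChars)
      = (l.filter (fun w => PySem.Str.strip w != ""
            && !(pvBlacklistB.any (fun bad => PySem.Str.isIn bad (PySem.Str.strip w))))).map
          (fun w => pvCleanWordB (PySem.Str.strip w)) := by
  rw [List.filter_map, List.filter_map, List.filter_filter, List.map_map]
  rw [show (fun a => ((fun t => !pvContainsPartialWord t) ∘ PySem.Str.strip) a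
        && ((fun t => t != "") ∘ PySem.Str.strip) a)
      = (fun w => PySem.Str.strip w != ""
        && !(pvBlacklistB.any (fun bad => PySem.Str.isIn bad (PySem.Str.strip w)))) from
    funext (fun w => by
      simp only [Function.comp, pvContainsPartialWord, pvBlacklistA, pvBlacklistB]
      exact Bool.and_comm _ _)]
  exact List.map_congr_left (fun w _ => by simp [Function.comp, pv_remove_eq_clean])

lemma pv_len_pos_eq (l : List String) : decide (l.length > 0) = !(l == []) := by
  cases l <;> simp

-- the two collapse loops agree
lemma pv_runA (c : Char) : ∀ (n k : Nat) (acc : List Char),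
    (List.replicate n c).foldl pvStepA (k, some c, acc)
      = (k + n, some c, acc ++ List.replicate (min n (3 - min (k + 1) 3)) c) := by
  intro n
  induction n with
  | zero => intro k acc; simp
  | succ n ih =>
    intro k acc
    rw [List.replicate_succ, List.foldl_cons]
    rw [show pvStepA (k, some c, acc) c
        = (k + 1, some c, if k + 1 < 3 then acc ++ [c] else acc) from by
      simp [pvStepA]]
    rw [ih (k + 1)]
    refine Prod.ext (by omega) (Prod.ext rfl ?_)
    simp only
    by_cases hk : k + 1 < 3
    · rw [if_pos hk, List.append_assoc, List.singleton_append, ← List.replicate_succ]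
      have h2 : min n (3 - min (k + 1 + 1) 3) + 1 = min (n + 1) (3 - min (k + 1) 3) := by omega
      rw [h2]
    · rw [if_neg hk]
      have h2 : min n (3 - min (k + 1 + 1) 3) = min (n + 1) (3 - min (k + 1) 3) := by omega
      rw [h2]

lemma pv_head_dropWhile_false {p : Char → Bool} : ∀ (l : List Char) (d : Char) (tl : List Char),
    l.dropWhile p = d :: tl → p d = false := by
  intro l
  induction l with
  | nil => intro d tl h; simp [List.dropWhile] at h
  | cons c t ih =>
    intro d tl h
    rw [List.dropWhile_cons] at h
    by_cases hc : p c = true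
    · rw [if_pos hc] at h; exact ih d tl h
    · rw [if_neg hc] at h
      cases h
      exact Bool.eq_false_iff.mpr hc

lemma pv_collapse_main : ∀ (cs : List Char) (k : Nat) (p : Option Char) (acc : List Char),
    (∀ c, cs.head? = some c → p ≠ some c) →
    (cs.foldl pvStepA (k, p, acc)).2.2 = acc ++ pvCollapseB cs := by
  intro cs
  induction cs using pvCollapseB.induct with
  | case1 => intro k p acc _; simp [pvCollapseB]
  | case2 c rest ih =>
    intro k p acc hp
    have hne : (p == some c) = false :=
      beq_eq_false_iff_ne.mpr (hp c rfl)
    have hcond : ∀ d, (rest.dropWhile (· == c)).head? = some d → (some c : Option Char) ≠ some d := by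
      intro d hd
      cases hdw : rest.dropWhile (· == c) with
      | nil => rw [hdw] at hd; simp at hd
      | cons e tl =>
        rw [hdw] at hd
        simp only [List.head?_cons, Option.some.injEq] at hd
        have h := pv_head_dropWhile_false rest e tl hdw
        simp only [beq_eq_false_iff_ne] at h
        intro hcd
        injection hcd with h2
        exact h (hd.trans h2.symm)
    have hrep : rest.takeWhile (· == c)
        = List.replicate (rest.takeWhile (· == c)).length c := by
      apply List.eq_replicate_iff.mpr
      exact ⟨rfl, fun b hb => by simpa using List.mem_takeWhile_imp hb⟩
    rw [List.foldl_cons]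
    rw [show pvStepA (k, p, acc) c = (0, some c, acc ++ [c]) from by simp [pvStepA, hne]]
    conv_lhs => rw [← List.takeWhile_append_dropWhile (p := (· == c)) (l := rest), hrep]
    rw [List.foldl_append, pv_runA]
    rw [ih _ (some c) _ hcond]
    rw [pvCollapseB]
    have h3 : min ((rest.takeWhile (· == c)).length + 1) 3
        = min ((rest.takeWhile (· == c)).length) (3 - min (0 + 1) 3) + 1 := by omega
    rw [h3, List.replicate_succ]
    simp [List.append_assoc]

lemma pv_collapseA_eq (t : String) : pvCollapseA t = String.ofList (pvCollapseB t.toList) := by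
  rw [pvCollapseA]
  congr 1
  rw [pv_collapse_main t.toList 0 none [] (fun c _ => by simp)]
  rfl

-- dedup: relative first-occurrence keys
def pvNewKeys (seen : PySem.Set String) : List String → List String
  | [] => []
  | w :: rest =>
    if PySem.Set.contains seen w then pvNewKeys seen rest
    else w :: pvNewKeys (PySem.Set.add seen w) rest

lemma pv_foldl_add_eq (ws : List String) : ∀ (seen : PySem.Set String),
    ws.foldl PySem.Set.add seen = seen ++ pvNewKeys seen ws := by
  induction ws with
  | nil => intro seen; simp [pvNewKeys]
  | cons w rest ih =>
    intro seen
    rw [List.foldl_cons, ih, pvNewKeys]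
    by_cases h : PySem.Set.contains seen w
    · rw [if_pos h]
      rw [show PySem.Set.add seen w = seen from by rw [PySem.Set.add, if_pos h]]
    · rw [if_neg h]
      rw [show PySem.Set.add seen w = seen ++ [w] from by rw [PySem.Set.add, if_neg h]]
      rw [List.append_assoc]
      rfl

lemma pv_loopB_eq (ws : List String) :
    ∀ (seen : PySem.Set String) (out : List String), out.length ≤ 15 →
    pvLoopB ws seen out
      = (out ++ (pvNewKeys seen ws).map (fun w => String.ofList (pvCollapseB w.toList))).take 15 := by
  induction ws with
  | nil =>
    intro seen out h
    rw [pvLoopB, pvNewKeys]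
    simp [List.take_of_length_le h]
  | cons w rest ih =>
    intro seen out h
    rw [pvLoopB, pvNewKeys]
    by_cases h15 : out.length = 15
    · rw [if_pos (by simpa using h15)]
      rw [List.take_append, h15]
      simp [List.take_of_length_le (le_of_eq h15)]
    · rw [if_neg (by simpa using h15)]
      by_cases hc : PySem.Set.contains seen w
      · rw [if_pos hc, if_pos hc, ih seen out h]
      · rw [if_neg hc, if_neg hc, ih _ _ (by simp; omega)]
        simp [List.append_assoc]

-- proof-only abbreviations for the shared pipeline after the prefix stage
def pvTailA (orig s : String) : List String :=
  let tags0 := (((PySem.Str.split? s " ").getD []).map PySem.Str.strip).filter (fun t => t != "")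
  let tags1 := tags0.filter (fun t => !pvContainsPartialWord t)
  let tags2 := tags1.map pvRemoveIgnoredChars
  let tags3 := if decide (tags2.length > 0) && PySem.Str.startswith orig "@"
      && PySem.Str.isIn "bot" (tags2.headD "") then tags2.drop 1 else tags2
  let tags4 := PySem.List.dedup tags3
  let filtered := tags4.foldl (fun acc t => acc ++ [pvCollapseA t]) []
  PySem.List.slice filtered none (some 15)

def pvTailB (orig s : String) : List String :=
  let words0 := ((PySem.Str.split? s " ").getD []).foldl
    (fun acc w =>
      if PySem.Str.strip w != ""
          && !(pvBlacklistB.any (fun bad => PySem.Str.isIn bad (PySem.Str.strip w))) then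
        acc ++ [pvCleanWordB (PySem.Str.strip w)]
      else acc) []
  let words := if !(words0 == []) && PySem.Str.startswith orig "@"
      && PySem.Str.isIn "bot" (words0.headD "") then words0.drop 1 else words0
  pvLoopB words PySem.Set.empty []

lemma pv_tails_eq (orig s : String) : pvTailA orig s = pvTailB orig s := by
  simp only [pvTailA, pvTailB]
  rw [PySem.List.foldl_append_if
    (p := fun w => PySem.Str.strip w != ""
      && !(pvBlacklistB.any (fun bad => PySem.Str.isIn bad (PySem.Str.strip w))))
    (f := fun w => pvCleanWordB (PySem.Str.strip w))]
  rw [List.nil_append, ← pv_words_eq, ← pv_len_pos_eq]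
  rw [pv_loopB_eq _ _ _ (by simp)]
  rw [PySem.List.foldl_append_singleton_eq_map, List.nil_append]
  rw [PySem.List.dedup_eq_ofList, PySem.Set.ofList_eq_foldl, pv_foldl_add_eq, List.nil_append]
  rw [PySem.List.slice_to _ (by norm_num : (0:Int) ≤ 15)]
  rw [show ((15:Int)).toNat = 15 from rfl]
  rw [show pvCollapseA = (fun w => String.ofList (pvCollapseB w.toList)) from funext pv_collapseA_eq]
  rfl

lemma pv_prefix_eq (text : String) :
    (["/tag", "#request"].foldl
      (fun b p => if PySem.Str.startswith b p then PySem.Str.slice b (some (PySem.Str.len p)) none else b)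
      (PySem.Str.strip (PySem.Str.lower text)))
    = (let text1 := PySem.Str.strip (PySem.Str.lower text)
       let text2 := if PySem.Str.startswith text1 "/tag" then PySem.Str.slice text1 (some 4) none else text1
       if PySem.Str.startswith text2 "#request" then PySem.Str.slice text2 (some 8) none else text2) := by
  rw [List.foldl_cons, List.foldl_cons, List.foldl_nil,
      show PySem.Str.len "/tag" = 4 from by decide,
      show PySem.Str.len "#request" = 8 from by decide]

-- ===== VERDICT (by name: the statement is the Claim_ definition above) =====
theorem get_tags_from_text_spec : Claim_equal_get_tags_from_text := by
  intro text limit _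
  unfold Spec_get_tags_from_text
  have hA : get_tags_from_text text limit
      = pvTailA text
          (let text1 := PySem.Str.strip (PySem.Str.lower text)
           let text2 := if PySem.Str.startswith text1 "/tag" then PySem.Str.slice text1 (some 4) none else text1
           if PySem.Str.startswith text2 "#request" then PySem.Str.slice text2 (some 8) none else text2) := rfl
  have hB : get_tags_from_text_alt text limit
      = pvTailB text
          (["/tag", "#request"].foldl
            (fun b p => if PySem.Str.startswith b p then PySem.Str.slice b (some (PySem.Str.len p)) none else b)
            (PySem.Str.strip (PySem.Str.lower text))) := rfl
  rw [hA, hB, pv_prefix_eq, pv_tails_eq]
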